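-- pv_equiv track=rewrite | github.com/Frosty63101/ChessEngine | features.py | _pawnIslandsCount
-- ===== SOURCE A (Python) =====
-- def _pawnIslandsCount(filesArr: list[int]) -> int:
--     """Count pawn islands: contiguous file groups with >=1 pawn."""
--     islands = 0
--     inIsland = False
--     for f in range(8):
--         hasPawn = filesArr[f] > 0
--         if hasPawn and not inIsland:
--             islands += 1
--             inIsland = True
--         elif not hasPawn:
--             inIsland = False
--     return islands
-- ===== SOURCE B (Python) =====
-- def _pawnIslandsCount(filesArr: list[int]) -> int:
--     """Count pawn islands: render occupancy as a string, split on empty files, count nonempty runs."""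
--     occ = ''.join('P' if filesArr[f] > 0 else '.' for f in range(8))
--     return len([run for run in occ.split('.') if run])
-- ===== Notes on version B (the rewrite author's own statement) =====
-- stated objective: alternative
-- what changed: Replaces the inIsland state-machine scan with two staged passes: render the 8 files' occupancy as a string, split it on the empty-file marker, and count the nonempty run segments.
import Mathlib
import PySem

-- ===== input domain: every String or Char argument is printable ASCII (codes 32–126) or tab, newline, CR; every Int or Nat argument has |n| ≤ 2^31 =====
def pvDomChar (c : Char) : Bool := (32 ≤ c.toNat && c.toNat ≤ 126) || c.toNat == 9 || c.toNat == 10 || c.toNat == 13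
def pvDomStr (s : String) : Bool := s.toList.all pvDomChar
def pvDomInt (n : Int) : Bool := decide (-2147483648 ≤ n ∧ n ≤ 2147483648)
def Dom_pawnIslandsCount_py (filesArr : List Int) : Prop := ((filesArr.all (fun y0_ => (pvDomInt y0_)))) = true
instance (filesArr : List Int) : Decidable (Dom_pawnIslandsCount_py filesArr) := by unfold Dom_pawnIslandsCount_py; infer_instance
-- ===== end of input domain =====

-- B renders the 8 files' occupancy as a string, splits it on the empty-file marker and counts nonempty runs, instead of A's inIsland state machine (different decomposition, same cost).

-- ===== PORT A =====
def pawnIslandsCount_py (filesArr : List Int) : Int :=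
  ((PySem.List.pyRange 0 8 1).foldl (fun (s : Int × Bool) f =>
      let hasPawn := decide (PySem.List.pyGetD filesArr f 0 > 0)
      if hasPawn && !s.2 then (s.1 + 1, true)
      else if !hasPawn then (s.1, false)
      else s) (0, false)).1

-- ===== PORT B =====
def pawnIslandsCount_py_alt (filesArr : List Int) : Int :=
  let occ := PySem.Str.join "" ((PySem.List.pyRange 0 8 1).map
      (fun f => if decide (PySem.List.pyGetD filesArr f 0 > 0) then "P" else "."))
  ((((PySem.Str.split? occ ".").getD []).filter (fun run => run ≠ "")).length : Int)  -- split? is some since sep ≠ ""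

-- ===== PRECONDITION & SPEC =====
-- Pre_ excludes exactly the lists of length < 8, on which both A and B raise IndexError at filesArr[f].
def Pre_pawnIslandsCount_py (filesArr : List Int) : Prop := 8 ≤ filesArr.length
instance (filesArr : List Int) : Decidable (Pre_pawnIslandsCount_py filesArr) := by unfold Pre_pawnIslandsCount_py; infer_instance
def pvWitness_pawnIslandsCount_py : List Int := [1, 0, 2, 0, 0, 3, 1, 0]
def Spec_pawnIslandsCount_py (filesArr : List Int) (out : Int) : Prop := out = pawnIslandsCount_py_alt filesArr
instance (filesArr : List Int) (out : Int) : Decidable (Spec_pawnIslandsCount_py filesArr out) := by unfold Spec_pawnIslandsCount_py; infer_instance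

-- ===== CLAIM =====
def Claim_equal_pawnIslandsCount_py : Prop := ∀ (filesArr : List Int), Dom_pawnIslandsCount_py filesArr → Pre_pawnIslandsCount_py filesArr → Spec_pawnIslandsCount_py filesArr (pawnIslandsCount_py filesArr)

-- ===== LEMMAS AND PROOFS =====
-- Core fact over the 8 occupancy booleans: the state-machine count equals the split-and-count-runs count.
theorem pawn_core (c0 c1 c2 c3 c4 c5 c6 c7 : Bool) :
    ((([c0,c1,c2,c3,c4,c5,c6,c7] : List Bool)).foldl (fun (s : Int × Bool) b =>
      if b && !s.2 then (s.1 + 1, true)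
      else if !b then (s.1, false)
      else s) (0, false)).1
    = ((((PySem.Str.split? (PySem.Str.join "" (([c0,c1,c2,c3,c4,c5,c6,c7] : List Bool).map
        (fun b => if b then "P" else "."))) ".").getD []).filter (fun run => run ≠ "")).length : Int) := by
  cases c0 <;> cases c1 <;> cases c2 <;> cases c3 <;> cases c4 <;> cases c5 <;> cases c6 <;> cases c7 <;> decide

-- The same fact restated for an occupancy function g over the files 0..7.
theorem pawn_core' (g : Int → Bool) :
    ((([0,1,2,3,4,5,6,7] : List Int)).foldl (fun (s : Int × Bool) f =>
      let hasPawn := g f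
      if hasPawn && !s.2 then (s.1 + 1, true)
      else if !hasPawn then (s.1, false)
      else s) (0, false)).1
    = ((((PySem.Str.split? (PySem.Str.join "" (([0,1,2,3,4,5,6,7] : List Int).map
        (fun f => if g f then "P" else "."))) ".").getD []).filter (fun run => run ≠ "")).length : Int) :=
  pawn_core (g 0) (g 1) (g 2) (g 3) (g 4) (g 5) (g 6) (g 7)

-- ===== VERDICT =====
set_option maxHeartbeats 800000 in
theorem pawnIslandsCount_py_spec : Claim_equal_pawnIslandsCount_py := by
  intro xs _ _
  unfold Spec_pawnIslandsCount_py pawnIslandsCount_py pawnIslandsCount_py_alt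
  have hr : PySem.List.pyRange 0 8 1 = [0,1,2,3,4,5,6,7] := by decide
  rw [hr]
  exact pawn_core' (fun f => decide (PySem.List.pyGetD xs f 0 > 0))
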